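-- pv_equiv track=rewrite | github.com/bnbong/Fall-In | scripts/split_sprite_sheets.py | sort_components_grid
-- ===== SOURCE A (Python) =====
-- def sort_components_grid(
--     components: list[tuple[int, int, int, int]],
-- ) -> list[tuple[int, int, int, int]]:
--     """Sort components in reading order (top-to-bottom, left-to-right)."""
--     if not components:
--         return components
--
--     # Group by approximate rows (within 50px = same row)
--     rows: list[list[tuple[int, int, int, int]]] = []
--     sorted_by_y = sorted(components, key=lambda b: b[1])
--
--     current_row: list[tuple[int, int, int, int]] = [sorted_by_y[0]]
--     current_row_y = sorted_by_y[0][1]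
--
--     for box in sorted_by_y[1:]:
--         if abs(box[1] - current_row_y) < 80:
--             current_row.append(box)
--         else:
--             rows.append(sorted(current_row, key=lambda b: b[0]))
--             current_row = [box]
--             current_row_y = box[1]
--
--     rows.append(sorted(current_row, key=lambda b: b[0]))
--
--     result = []
--     for row in rows:
--         result.extend(row)
--     return result
-- ===== SOURCE B (Python) =====
-- def sort_components_grid(
--     components: list[tuple[int, int, int, int]],
-- ) -> list[tuple[int, int, int, int]]:
--     """Sort components in reading order (top-to-bottom, left-to-right)."""
--     if not components:
--         return components
--
--     # Recursive row splitting: repeatedly peel the leading row (boxes whose y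
--     # is within 80 of the row's first box) off the y-sorted list, sort it by x
--     # and prepend it to the sorted remainder.
--     def rows(xs: list[tuple[int, int, int, int]]) -> list[tuple[int, int, int, int]]:
--         if not xs:
--             return []
--         anchor = xs[0][1]
--         k = 1
--         while k < len(xs) and abs(xs[k][1] - anchor) < 80:
--             k += 1
--         return sorted(xs[:k], key=lambda b: b[0]) + rows(xs[k:])
--
--     return rows(sorted(components, key=lambda b: b[1]))
-- ===== Notes on version B (the rewrite author's own statement) =====
-- stated objective: alternative
-- what changed: Replaces A's single stateful accumulation loop (rows list + current row + anchor) by a recursive head-row splitter: peel the leading row off the y-sorted list with a prefix scan, sort it by x, and recurse on the remainder.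
import Mathlib
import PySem

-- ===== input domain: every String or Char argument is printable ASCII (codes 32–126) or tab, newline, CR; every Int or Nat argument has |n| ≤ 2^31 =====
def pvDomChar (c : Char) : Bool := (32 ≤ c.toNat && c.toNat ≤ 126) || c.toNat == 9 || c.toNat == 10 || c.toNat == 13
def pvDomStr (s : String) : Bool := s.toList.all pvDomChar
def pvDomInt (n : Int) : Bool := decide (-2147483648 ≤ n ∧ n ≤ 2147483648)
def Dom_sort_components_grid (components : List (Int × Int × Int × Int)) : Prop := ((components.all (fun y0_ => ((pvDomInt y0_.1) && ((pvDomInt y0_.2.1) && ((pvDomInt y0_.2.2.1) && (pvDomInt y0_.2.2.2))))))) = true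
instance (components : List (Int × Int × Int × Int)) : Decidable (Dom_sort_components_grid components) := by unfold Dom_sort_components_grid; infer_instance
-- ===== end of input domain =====

-- B replaces A's stateful accumulation loop by a recursive head-row splitter
-- (peel the leading row, sort it by x, recurse): an alternative decomposition.

-- ===== PORT A =====
def sort_components_grid (components : List (Int × Int × Int × Int)) : List (Int × Int × Int × Int) :=
  if components.isEmpty then components
  else
    match PySem.List.sorted components (fun b => b.2.1) false with
    | [] => []   -- unreachable: components is nonempty here
    | first :: rest =>
      let st := rest.foldl
        (fun (st : List (List (Int × Int × Int × Int)) × List (Int × Int × Int × Int) × Int) box =>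
          if |box.2.1 - st.2.2| < 80 then
            (st.1, st.2.1 ++ [box], st.2.2)
          else
            (st.1 ++ [PySem.List.sorted st.2.1 (fun b => b.1) false], [box], box.2.1))
        ([], [first], first.2.1)
      let rows := st.1 ++ [PySem.List.sorted st.2.1 (fun b => b.1) false]
      rows.foldl (fun result row => result ++ row) []

-- ===== PORT B =====
-- the inner recursive helper `rows` of Source B; the index scan `while k < len(xs)
-- and abs(xs[k][1] - anchor) < 80` computes exactly the takeWhile/dropWhile split
def pvAltRows : List (Int × Int × Int × Int) → List (Int × Int × Int × Int)
  | [] => []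
  | b :: l =>
      PySem.List.sorted (b :: l.takeWhile (fun c => |c.2.1 - b.2.1| < 80)) (fun x => x.1) false
        ++ pvAltRows (l.dropWhile (fun c => |c.2.1 - b.2.1| < 80))
termination_by xs => xs.length
decreasing_by
  have := List.length_dropWhile_le (fun c : Int × Int × Int × Int => decide (|c.2.1 - b.2.1| < 80)) l
  simpa using Nat.lt_succ_of_le this

def sort_components_grid_alt (components : List (Int × Int × Int × Int)) : List (Int × Int × Int × Int) :=
  if components.isEmpty then components
  else pvAltRows (PySem.List.sorted components (fun b => b.2.1) false)

-- ===== PRECONDITION & SPEC =====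
def Spec_sort_components_grid (components : List (Int × Int × Int × Int)) (out : List (Int × Int × Int × Int)) : Prop := out = sort_components_grid_alt components
instance (components : List (Int × Int × Int × Int)) (out : List (Int × Int × Int × Int)) : Decidable (Spec_sort_components_grid components out) := by unfold Spec_sort_components_grid; infer_instance

-- ===== CLAIM (what is proved, stated in full; the proofs are below) =====
def Claim_equal_sort_components_grid : Prop := ∀ (components : List (Int × Int × Int × Int)), Dom_sort_components_grid components → Spec_sort_components_grid components (sort_components_grid components)

-- ===== LEMMAS AND PROOFS =====

-- abstract description of A's grouping loop: list of rows built from pending row `cur` with anchor `y`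
def pvGroup : List (Int × Int × Int × Int) → List (Int × Int × Int × Int) → Int → List (List (Int × Int × Int × Int))
  | [], cur, _ => [cur]
  | b :: l, cur, y => if |b.2.1 - y| < 80 then pvGroup l (cur ++ [b]) y else cur :: pvGroup l [b] b.2.1

-- A's loop computes pvGroup with each finished row sorted by x
theorem pv_LA (l : List (Int × Int × Int × Int)) :
    ∀ (rows : List (List (Int × Int × Int × Int))) (cur : List (Int × Int × Int × Int)) (y : Int),
    (l.foldl
        (fun (st : List (List (Int × Int × Int × Int)) × List (Int × Int × Int × Int) × Int) box =>
          if |box.2.1 - st.2.2| < 80 then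
            (st.1, st.2.1 ++ [box], st.2.2)
          else
            (st.1 ++ [PySem.List.sorted st.2.1 (fun b => b.1) false], [box], box.2.1))
        (rows, cur, y)).1
      ++ [PySem.List.sorted
            (l.foldl
              (fun (st : List (List (Int × Int × Int × Int)) × List (Int × Int × Int × Int) × Int) box =>
                if |box.2.1 - st.2.2| < 80 then
                  (st.1, st.2.1 ++ [box], st.2.2)
                else
                  (st.1 ++ [PySem.List.sorted st.2.1 (fun b => b.1) false], [box], box.2.1))
              (rows, cur, y)).2.1 (fun b => b.1) false]
      = rows ++ (pvGroup l cur y).map (fun r => PySem.List.sorted r (fun b => b.1) false) := by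
  induction l with
  | nil => intro rows cur y; simp [pvGroup]
  | cons b l ih =>
      intro rows cur y
      by_cases h : |b.2.1 - y| < 80
      · simp only [List.foldl_cons, h, if_true, pvGroup]
        exact ih rows (cur ++ [b]) y
      · simp only [List.foldl_cons, h, if_false, pvGroup]
        rw [ih (rows ++ [PySem.List.sorted cur (fun b => b.1) false]) [b] b.2.1]
        simp

-- pvGroup splits off the takeWhile prefix as the pending row
theorem pv_group_split (l : List (Int × Int × Int × Int)) :
    ∀ (cur : List (Int × Int × Int × Int)) (y : Int),
    pvGroup l cur y =
      match l.dropWhile (fun c => |c.2.1 - y| < 80) with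
      | [] => [cur ++ l]
      | c :: t => (cur ++ l.takeWhile (fun c => |c.2.1 - y| < 80)) :: pvGroup t [c] c.2.1 := by
  induction l with
  | nil => intro cur y; simp [pvGroup]
  | cons b l ih =>
      intro cur y
      by_cases h : |b.2.1 - y| < 80
      · simp only [pvGroup, h, if_true, List.dropWhile_cons, List.takeWhile_cons, decide_true]
        rw [ih (cur ++ [b]) y]
        cases hdw : l.dropWhile (fun c => decide (|c.2.1 - y| < 80)) with
        | nil => simp
        | cons c t => simp
      · simp only [pvGroup, h, if_false, List.dropWhile_cons, List.takeWhile_cons, decide_false]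
        simp

-- B's recursion computes the flattened sorted groups
theorem pv_alt_eq_group (n : Nat) : ∀ (b : Int × Int × Int × Int) (l : List (Int × Int × Int × Int)),
    l.length ≤ n →
    pvAltRows (b :: l)
      = ((pvGroup l [b] b.2.1).map (fun r => PySem.List.sorted r (fun x => x.1) false)).flatten := by
  induction n with
  | zero =>
      intro b l hl
      have : l = [] := List.eq_nil_of_length_eq_zero (Nat.le_zero.mp hl)
      subst this
      simp [pvAltRows, pvGroup]
  | succ n ih =>
      intro b l hl
      rw [pvAltRows, pv_group_split l [b] b.2.1]
      cases hdw : l.dropWhile (fun c => decide (|c.2.1 - b.2.1| < 80)) with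
      | nil =>
          have ht : l.takeWhile (fun c => decide (|c.2.1 - b.2.1| < 80)) = l := by
            have h2 := List.takeWhile_append_dropWhile
              (p := fun c : Int × Int × Int × Int => decide (|c.2.1 - b.2.1| < 80)) (l := l)
            rw [hdw, List.append_nil] at h2
            exact h2
          rw [ht]
          simp [pvAltRows]
      | cons c t =>
          have htl : t.length ≤ n := by
            have h1 := List.length_dropWhile_le (fun c : Int × Int × Int × Int => decide (|c.2.1 - b.2.1| < 80)) l
            rw [hdw] at h1
            simp at h1
            omega
          simp only [List.map_cons, List.flatten_cons, List.cons_append]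
          rw [ih c t htl]
          simp

theorem main_eq (components : List (Int × Int × Int × Int)) :
    sort_components_grid components = sort_components_grid_alt components := by
  unfold sort_components_grid sort_components_grid_alt
  by_cases hne : components.isEmpty
  · simp [hne]
  · simp only [hne]
    have hs : PySem.List.sorted components (fun b => b.2.1) false ≠ [] := by
      simpa [PySem.List.sorted_eq_nil_iff] using (by simpa [List.isEmpty_iff] using hne : components ≠ [])
    cases hsy : PySem.List.sorted components (fun b => b.2.1) false with
    | nil => exact absurd hsy hs
    | cons first rest =>
      simp only []
      rw [PySem.List.foldl_append_eq_flatten]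
      have hA := pv_LA rest [] [first] first.2.1
      simp only [List.nil_append] at hA
      rw [hA, pv_alt_eq_group rest.length first rest (le_refl _)]
      simp

-- ===== VERDICT (by name: the statement is the Claim_ definition above) =====
theorem sort_components_grid_spec : Claim_equal_sort_components_grid := by
  intro components _
  unfold Spec_sort_components_grid
  exact main_eq components
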